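-- pv_equiv track=rewrite | github.com/rebouny/advent-of-code-2021 | 14/aoc_2021_14.py | step_n
-- ===== SOURCE A (Python) =====
-- def step_n(n_polymer: int, rules):
--     """Calculates n-th step for polymer"""
--     num = n_polymer
--     ret_num = 0
--     power = 1
--     while num > 0:
--         if num < 10:
--             ret_num += num * power
--             num = 0
--         else:
--             last = num % 10
--             num = num // 10
--             ins = rules[10 * (num%10) + last]
--
--             ret_num += power * last
--             power *= 10
--             ret_num += power * ins
--             power *= 10
--
--     return ret_num
-- ===== SOURCE B (Python) =====
-- def _digits(n):
--     """Decimal digits of n, most significant first."""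
--     return ([] if n < 10 else _digits(n // 10)) + [n % 10]
--
--
-- def step_n(n_polymer: int, rules):
--     """Calculates n-th step for polymer"""
--     if n_polymer <= 0:
--         return 0
--     ds = _digits(n_polymer)
--     result = 0
--     for i, d in enumerate(ds):
--         result = result * 10 + d
--         if i < len(ds) - 1:
--             result = result * 10 + rules[10 * d + ds[i + 1]]
--     return result
-- ===== Notes on version B (the rewrite author's own statement) =====
-- stated objective: alternative
-- what changed: B materializes the decimal digit list once and builds the result most-significant-first with a Horner accumulation (result = result*10 + digit / + rule), replacing A's least-significant-first while-loop that extracts digits with %10,//10 and tracks an explicit power-of-ten accumulator.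
import Mathlib
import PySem

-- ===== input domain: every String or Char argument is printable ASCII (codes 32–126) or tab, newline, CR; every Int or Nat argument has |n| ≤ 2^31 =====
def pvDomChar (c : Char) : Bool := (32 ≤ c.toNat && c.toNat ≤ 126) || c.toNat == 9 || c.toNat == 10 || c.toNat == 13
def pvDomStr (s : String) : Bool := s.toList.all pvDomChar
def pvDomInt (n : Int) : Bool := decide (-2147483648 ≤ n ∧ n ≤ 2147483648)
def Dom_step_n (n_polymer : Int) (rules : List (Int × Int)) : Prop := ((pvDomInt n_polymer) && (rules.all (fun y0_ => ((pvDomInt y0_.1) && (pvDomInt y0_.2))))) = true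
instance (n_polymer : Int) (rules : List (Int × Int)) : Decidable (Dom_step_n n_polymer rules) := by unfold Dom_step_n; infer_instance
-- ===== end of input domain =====

-- B materializes the digit list and builds the result most-significant-first by a Horner pass
-- with lookahead, instead of A's least-significant-first %10//10 loop with explicit powers;
-- objective: alternative (same cost, different decomposition).


-- ===== PORT A =====
-- the while loop of A; rules[k] is a dict lookup (KeyError excluded by Pre_, so getD 0 is safe)
def stepALoop (rules : PySem.Dict Int Int) (num ret_num power : Int) : Int :=
  if 0 < num then
    if num < 10 then ret_num + num * power
    else
      let last := PySem.Int.mod num 10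
      let num' := PySem.Int.floordiv num 10
      let ins := PySem.Dict.getD rules (10 * PySem.Int.mod num' 10 + last) 0
      stepALoop rules num' (ret_num + power * last + power * 10 * ins) (power * 10 * 10)
  else ret_num
termination_by num.toNat
decreasing_by
  rw [PySem.Int.floordiv_eq_ediv_of_pos (by norm_num)]
  omega

def step_n (n_polymer : Int) (rules : List (Int × Int)) : Int :=
  stepALoop (PySem.Dict.ofList rules) n_polymer 0 1

-- ===== PORT B =====
-- _digits: decimal digits, most significant first
def digitsB (n : Int) : List Int :=
  (if n < 10 then [] else digitsB (PySem.Int.floordiv n 10)) ++ [PySem.Int.mod n 10]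
termination_by n.toNat
decreasing_by
  rw [PySem.Int.floordiv_eq_ediv_of_pos (by norm_num)]
  omega

-- B's for-loop over the digit list with one-digit lookahead
def hornerB (rules : PySem.Dict Int Int) (acc : Int) : List Int → Int
  | [] => acc
  | [d] => acc * 10 + d
  | d :: d2 :: rest =>
      hornerB rules ((acc * 10 + d) * 10 + PySem.Dict.getD rules (10 * d + d2) 0) (d2 :: rest)

def step_n_alt (n_polymer : Int) (rules : List (Int × Int)) : Int :=
  if n_polymer ≤ 0 then 0
  else hornerB (PySem.Dict.ofList rules) 0 (digitsB n_polymer)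

-- ===== PRECONDITION & SPEC =====
-- pairKeys n: the key 10*d1+d2 for every adjacent decimal digit pair (d1,d2) of n, read off
-- the decimal string of n (a shape of the input, not either port's computation)
def pairKeys (n : Int) : List Int :=
  (let ds := (PySem.Int.toChars n).map (fun c => (c.toNat : Int) - 48)
   ds.zip ds.tail).map (fun p => 10 * p.1 + p.2)

-- Pre_ excludes exactly the inputs where the Python raises KeyError: n_polymer ≥ 10 and some
-- adjacent decimal digit pair of n_polymer has no entry for its key 10*d1+d2 in rules (B
-- raises the same KeyError there); no other input is excluded.
def Pre_step_n (n_polymer : Int) (rules : List (Int × Int)) : Prop :=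
  10 ≤ n_polymer → ∀ k ∈ pairKeys n_polymer, rules.any (fun p => p.1 == k) = true
instance (n_polymer : Int) (rules : List (Int × Int)) : Decidable (Pre_step_n n_polymer rules) := by
  unfold Pre_step_n; infer_instance

def pvWitness_step_n : Int × (List (Int × Int)) := (12, [(12, 3)])

def Spec_step_n (n_polymer : Int) (rules : List (Int × Int)) (out : Int) : Prop := out = step_n_alt n_polymer rules
instance (n_polymer : Int) (rules : List (Int × Int)) (out : Int) : Decidable (Spec_step_n n_polymer rules out) := by unfold Spec_step_n; infer_instance

-- ===== CLAIM (what is proved, stated in full; the proofs are below) =====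
def Claim_equal_step_n : Prop := ∀ (n_polymer : Int) (rules : List (Int × Int)), Dom_step_n n_polymer rules → Pre_step_n n_polymer rules → Spec_step_n n_polymer rules (step_n n_polymer rules)

-- ===== LEMMAS AND PROOFS =====

theorem digitsB_ne_nil (n : Int) : digitsB n ≠ [] := by
  unfold digitsB
  simp

theorem digitsB_small {n : Int} (h0 : 0 < n) (h : n < 10) : digitsB n = [n] := by
  unfold digitsB
  rw [if_pos h, PySem.Int.mod_eq_emod_of_pos (by norm_num)]
  have he : n % 10 = n := Int.emod_eq_of_lt (by omega) (by omega)
  simp [he]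

theorem digitsB_getLastD (n : Int) : (digitsB n).getLastD 0 = PySem.Int.mod n 10 := by
  unfold digitsB
  simp

-- Horner pass on ds ++ [d]: appending one digit multiplies by 100 and adds the insertion and d
theorem hornerB_append (rules : PySem.Dict Int Int) (d : Int) :
    ∀ (ds : List Int) (acc : Int), ds ≠ [] →
      hornerB rules acc (ds ++ [d]) =
        hornerB rules acc ds * 100 +
          PySem.Dict.getD rules (10 * ds.getLastD 0 + d) 0 * 10 + d := by
  intro ds
  induction ds with
  | nil => intro acc h; exact absurd rfl h
  | cons x xs ih =>
      intro acc _
      cases xs with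
      | nil => simp [hornerB]; ring
      | cons y ys =>
          rw [List.cons_append, List.cons_append]
          show hornerB rules _ (y :: (ys ++ [d])) = _
          rw [← List.cons_append, ih _ (by simp)]
          simp [hornerB]

-- Main invariant: A's loop on positive num computes ret + power * (Horner on the digits)
theorem stepALoop_eq_aux (rules : PySem.Dict Int Int) :
    ∀ (k : Nat) (num : Int), num.toNat = k → 0 < num → ∀ (ret power : Int),
      stepALoop rules num ret power = ret + power * hornerB rules 0 (digitsB num) := by
  intro k
  induction k using Nat.strong_induction_on with
  | _ k ih =>
    intro num hk h0 ret power
    have hfd : PySem.Int.floordiv num 10 = num / 10 :=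
      PySem.Int.floordiv_eq_ediv_of_pos (by norm_num)
    by_cases hs : num < 10
    · rw [stepALoop, if_pos h0, if_pos hs, digitsB_small h0 hs]
      simp [hornerB]; ring
    · rw [stepALoop, if_pos h0, if_neg hs]
      have h0' : 0 < PySem.Int.floordiv num 10 := by rw [hfd]; omega
      have hlt : (PySem.Int.floordiv num 10).toNat < k := by rw [hfd]; omega
      rw [ih _ hlt _ rfl h0']
      conv_rhs => rw [digitsB, if_neg hs]
      rw [hornerB_append _ _ _ _ (digitsB_ne_nil _), digitsB_getLastD]
      ring

theorem stepALoop_eq (rules : PySem.Dict Int Int) (num : Int) (h0 : 0 < num)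
    (ret power : Int) :
    stepALoop rules num ret power = ret + power * hornerB rules 0 (digitsB num) :=
  stepALoop_eq_aux rules num.toNat num rfl h0 ret power

-- ===== VERDICT (by name: the statement is the Claim_ definition above) =====
theorem step_n_spec : Claim_equal_step_n := by
  intro n rules _ _
  unfold Spec_step_n step_n step_n_alt
  by_cases h : n ≤ 0
  · rw [if_pos h]
    unfold stepALoop
    rw [if_neg (by omega)]
  · rw [if_neg h, stepALoop_eq _ n (by omega)]
    ring
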